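-- pv_equiv track=rewrite | github.com/WhiteMouseDev/HaruKoto | apps/api/scripts/validate_mobile_contracts.py | _endpoint_exists
-- ===== SOURCE A (Python) =====
-- def _normalize(path: str) -> str:
--     """Normalize trailing slash for comparison. FastAPI treats `/x` and `/x/` as
--     the same endpoint via 307 redirect, so we consider them equivalent here."""
--     return path.rstrip("/") or "/"
--
-- def _paths_match(concrete: str, template: str) -> bool:
--     """Return True if concrete path matches OpenAPI path template."""
--     lhs = _normalize(concrete).split("/")
--     rhs = _normalize(template).split("/")
--     if len(lhs) != len(rhs):
--         return False
--     for part_c, part_t in zip(lhs, rhs, strict=True):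
--         if part_t.startswith("{") and part_t.endswith("}"):
--             continue
--         if part_c != part_t:
--             return False
--     return True
--
-- def _endpoint_exists(method: str, path: str, openapi: dict) -> bool:
--     method_lc = method.lower()
--     paths = openapi.get("paths", {}) or {}
--     normalized_path = _normalize(path)
--     # Fast path (with trailing-slash normalization)
--     for candidate in (path, normalized_path, normalized_path + "/"):
--         entry = paths.get(candidate)
--         if entry and method_lc in entry:
--             return True
--     # Templated match
--     return any(_paths_match(path, template) and method_lc in ops for template, ops in paths.items())
-- ===== SOURCE B (Python) =====
-- def _norm_segments(p):
--     return (p.rstrip("/") or "/").split("/")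
--
-- def _segments_match(lhs, segs):
--     for c, t in zip(lhs, segs):
--         if not (t.startswith("{") and t.endswith("}")) and c != t:
--             return False
--     return True
--
-- def _endpoint_exists(method, path, openapi):
--     method_lc = method.lower()
--     paths = openapi.get("paths", {}) or {}
--     buckets = {}
--     for template, ops in paths.items():
--         segs = _norm_segments(template)
--         buckets.setdefault(len(segs), []).append((segs, ops))
--     lhs = _norm_segments(path)
--     for segs, ops in buckets.get(len(lhs), []):
--         if method_lc in ops and _segments_match(lhs, segs):
--             return True
--     return False
-- ===== Notes on version B (the rewrite author's own statement) =====
-- stated objective: alternative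
-- what changed: B drops A's redundant exact-key fast path and replaces the linear template scan with a one-pass index keyed by normalized segment count, then checks only the bucket whose segment count matches the query path.
import Mathlib
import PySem

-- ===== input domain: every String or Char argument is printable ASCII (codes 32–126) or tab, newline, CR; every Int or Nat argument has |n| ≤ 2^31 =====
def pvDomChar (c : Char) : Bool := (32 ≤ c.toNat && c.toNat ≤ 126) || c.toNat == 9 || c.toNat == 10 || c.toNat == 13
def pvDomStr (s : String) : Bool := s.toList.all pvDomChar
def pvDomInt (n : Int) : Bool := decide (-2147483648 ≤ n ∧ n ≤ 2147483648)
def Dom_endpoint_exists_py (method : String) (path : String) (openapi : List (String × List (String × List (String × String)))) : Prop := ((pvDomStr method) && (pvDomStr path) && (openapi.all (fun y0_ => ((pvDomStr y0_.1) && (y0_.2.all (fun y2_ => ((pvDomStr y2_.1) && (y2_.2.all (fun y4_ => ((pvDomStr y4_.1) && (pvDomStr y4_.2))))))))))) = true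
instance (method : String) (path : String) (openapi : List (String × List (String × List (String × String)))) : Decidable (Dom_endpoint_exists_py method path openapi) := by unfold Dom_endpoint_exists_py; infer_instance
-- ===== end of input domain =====

-- B drops A's redundant exact-key fast path and scans only the length bucket of a
-- segment-count index built in one pass (objective: alternative structure, same value).

-- ===== PORT A =====
-- s.rstrip("/") ported by hand (PySem has no one-sided strip with a chars argument):
-- drop trailing '/' characters; exact for any string.
def pvRstripSlashA (s : String) : String :=
  String.ofList ((s.toList.reverse.dropWhile (fun c => c == '/')).reverse)

def pvNormalizeA (p : String) : String :=
  let r := pvRstripSlashA p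
  if r = "" then "/" else r

-- s.split("/"): sep ≠ "", so PySem.Str.split? always returns some; getD [] never fires.
def pvSplitSlashA (s : String) : List String :=
  (PySem.Str.split? s "/").getD []

def pvZipLoopA : List (String × String) → Bool
  | [] => true
  | (pc, pt) :: rest =>
    if PySem.Str.startswith pt "{" && PySem.Str.endswith pt "}" then pvZipLoopA rest
    else if pc ≠ pt then false
    else pvZipLoopA rest

def pvPathsMatchA (concrete : String) (template : String) : Bool :=
  let lhs := pvSplitSlashA (pvNormalizeA concrete)
  let rhs := pvSplitSlashA (pvNormalizeA template)
  if lhs.length ≠ rhs.length then false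
  else pvZipLoopA (lhs.zip rhs)

def endpoint_exists_py (method : String) (path : String) (openapi : List (String × List (String × List (String × String)))) : Bool :=
  let methodLc := PySem.Str.lower method
  let paths := ((PySem.Dict.mk openapi).get? "paths").getD []
  let normalizedPath := pvNormalizeA path
  let fast := [path, normalizedPath, normalizedPath ++ "/"].any (fun candidate =>
    match (PySem.Dict.mk paths).get? candidate with
    | some entry => !entry.isEmpty && (PySem.Dict.mk entry).contains methodLc
    | none => false)
  if fast then true
  else paths.any (fun p => pvPathsMatchA path p.1 && (PySem.Dict.mk p.2).contains methodLc)

-- ===== PORT B =====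
def pvRstripSlashB (s : String) : String :=
  String.ofList ((s.toList.reverse.dropWhile (fun c => c == '/')).reverse)

def pvNormSegsB (p : String) : List String :=
  (PySem.Str.split? (let r := pvRstripSlashB p; if r = "" then "/" else r) "/").getD []

def pvSegsMatchB (lhs : List String) (segs : List String) : Bool :=
  (lhs.zip segs).all (fun q =>
    (PySem.Str.startswith q.2 "{" && PySem.Str.endswith q.2 "}") || q.1 == q.2)

def endpoint_exists_py_alt (method : String) (path : String) (openapi : List (String × List (String × List (String × String)))) : Bool :=
  let methodLc := PySem.Str.lower method
  let paths := ((PySem.Dict.mk openapi).get? "paths").getD []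
  let buckets := paths.foldl
    (fun d p =>
      let segs := pvNormSegsB p.1
      d.modify (Int.ofNat segs.length) [] (fun l => l ++ [(segs, p.2)]))
    (PySem.Dict.empty : PySem.Dict Int (List (List String × List (String × String))))
  let lhs := pvNormSegsB path
  (buckets.getD (Int.ofNat lhs.length) []).any (fun q =>
    (PySem.Dict.mk q.2).contains methodLc && pvSegsMatchB lhs q.1)

-- ===== PRECONDITION & SPEC =====
def Spec_endpoint_exists_py (method : String) (path : String) (openapi : List (String × List (String × List (String × String)))) (out : Bool) : Prop := out = endpoint_exists_py_alt method path openapi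
instance (method : String) (path : String) (openapi : List (String × List (String × List (String × String)))) (out : Bool) : Decidable (Spec_endpoint_exists_py method path openapi out) := by unfold Spec_endpoint_exists_py; infer_instance

-- ===== CLAIM (what is proved, stated in full; the proofs are below) =====
def Claim_equal_endpoint_exists_py : Prop := ∀ (method : String) (path : String) (openapi : List (String × List (String × List (String × String)))), Dom_endpoint_exists_py method path openapi → Spec_endpoint_exists_py method path openapi (endpoint_exists_py method path openapi)

-- ===== LEMMAS AND PROOFS =====

theorem pvNormSegsB_eq (p : String) :
    pvNormSegsB p = pvSplitSlashA (pvNormalizeA p) := rfl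

theorem pvZipLoopA_eq_all (l : List (String × String)) :
    pvZipLoopA l = l.all (fun q =>
      (PySem.Str.startswith q.2 "{" && PySem.Str.endswith q.2 "}") || q.1 == q.2) := by
  induction l with
  | nil => rfl
  | cons hd tl ih =>
    obtain ⟨pc, pt⟩ := hd
    simp only [pvZipLoopA, List.all_cons]
    split_ifs with h1 h2
    · rw [h1, Bool.true_or, Bool.true_and, ih]
    · rw [Bool.not_eq_true] at h1
      rw [h1, Bool.false_or, beq_eq_false_iff_ne.mpr h2, Bool.false_and]
    · have hpc : pc = pt := not_not.mp h2
      rw [beq_iff_eq.mpr hpc, Bool.or_true, Bool.true_and, ih]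

theorem pvPathsMatchA_eq (path t : String) :
    pvPathsMatchA path t =
      (decide ((pvNormSegsB t).length = (pvNormSegsB path).length)
        && pvSegsMatchB (pvNormSegsB path) (pvNormSegsB t)) := by
  simp only [pvPathsMatchA, pvSegsMatchB, pvNormSegsB_eq]
  split_ifs with h
  · rw [decide_eq_false (fun hh => h hh.symm), Bool.false_and]
  · rw [decide_eq_true (by omega), Bool.true_and, pvZipLoopA_eq_all]

theorem pvSegsMatchB_refl (l : List String) : pvSegsMatchB l l = true := by
  induction l with
  | nil => rfl
  | cons hd tl ih =>
    simp only [pvSegsMatchB, List.zip_cons_cons, List.all_cons, beq_self_eq_true,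
      Bool.or_true, Bool.true_and] at ih ⊢
    exact ih

theorem pv_dropWhile_idem {α : Type} (p : α → Bool) (l : List α) :
    List.dropWhile p (List.dropWhile p l) = List.dropWhile p l := by
  induction l with
  | nil => rfl
  | cons hd tl ih =>
    by_cases h : p hd
    · simp [h, ih]
    · simp [h]

theorem pvRstripSlashA_idem (s : String) :
    pvRstripSlashA (pvRstripSlashA s) = pvRstripSlashA s := by
  simp only [pvRstripSlashA]
  congr 1
  simp only [String.toList_ofList, List.reverse_reverse, pv_dropWhile_idem]

theorem pvNormalizeA_idem (p : String) :
    pvNormalizeA (pvNormalizeA p) = pvNormalizeA p := by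
  by_cases h : pvRstripSlashA p = ""
  · have h1 : pvNormalizeA p = "/" := by simp [pvNormalizeA, h]
    rw [h1]; decide
  · have h1 : pvNormalizeA p = pvRstripSlashA p := by simp [pvNormalizeA, h]
    rw [h1]
    simp [pvNormalizeA, pvRstripSlashA_idem, h]

theorem pvRstripSlashA_append_slash (s : String) :
    pvRstripSlashA (s ++ "/") = pvRstripSlashA s := by
  simp [pvRstripSlashA, String.toList_append]

theorem pvNormalizeA_append_slash (p : String) :
    pvNormalizeA (pvNormalizeA p ++ "/") = pvNormalizeA p := by
  by_cases h : pvRstripSlashA p = ""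
  · have h1 : pvNormalizeA p = "/" := by simp [pvNormalizeA, h]
    rw [h1]; decide
  · have h1 : pvNormalizeA p = pvRstripSlashA p := by simp [pvNormalizeA, h]
    rw [h1]
    have h2 : pvRstripSlashA (pvRstripSlashA p ++ "/") = pvRstripSlashA p := by
      rw [pvRstripSlashA_append_slash, pvRstripSlashA_idem]
    simp [pvNormalizeA, h2, h]

theorem pvPathsMatch_candidate (path c : String)
    (hc : c = path ∨ c = pvNormalizeA path ∨ c = pvNormalizeA path ++ "/") :
    pvPathsMatchA path c = true := by
  have hn : pvNormalizeA c = pvNormalizeA path := by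
    rcases hc with h | h | h
    · rw [h]
    · rw [h, pvNormalizeA_idem]
    · rw [h, pvNormalizeA_append_slash]
  rw [pvPathsMatchA_eq, pvNormSegsB_eq, pvNormSegsB_eq, hn]
  simp [pvSegsMatchB_refl]

-- A returns `paths.any (matches ∧ method ∈ ops)`: the fast path only ever fires when
-- the templated scan would also succeed.
theorem endpoint_exists_py_eq_any (method path : String)
    (openapi : List (String × List (String × List (String × String)))) :
    endpoint_exists_py method path openapi =
      (((PySem.Dict.mk openapi).get? "paths").getD []).any
        (fun p => pvPathsMatchA path p.1 && (PySem.Dict.mk p.2).contains (PySem.Str.lower method)) := by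
  unfold endpoint_exists_py
  set methodLc := PySem.Str.lower method with hm
  set paths := ((PySem.Dict.mk openapi).get? "paths").getD [] with hp
  simp only []
  split_ifs with hfast
  · symm
    rw [List.any_eq_true] at hfast ⊢
    obtain ⟨c, hcmem, hc⟩ := hfast
    cases hget : (PySem.Dict.mk paths).get? c with
    | none => rw [hget] at hc; simp at hc
    | some entry =>
      rw [hget] at hc
      simp only [Bool.and_eq_true, Bool.not_eq_eq_eq_not] at hc
      have hmem : (c, entry) ∈ paths :=
        PySem.Dict.mem_items_of_get?_eq_some (PySem.Dict.mk paths) hget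
      refine ⟨(c, entry), hmem, ?_⟩
      have hmatch : pvPathsMatchA path c = true := by
        apply pvPathsMatch_candidate
        simp only [List.mem_cons] at hcmem
        tauto
      simp [hmatch, hc.2]
  · rfl

-- B returns the same `any`, through the length-bucket index.
theorem pv_getD_foldl_modify_key {κ β γ : Type} [BEq κ] [LawfulBEq κ] [DecidableEq κ]
    (l : List γ) (k : γ → κ) (v : γ → β) (d : PySem.Dict κ (List β)) (c : κ) :
    (l.foldl (fun d x => d.modify (k x) [] (fun s => s ++ [v x])) d).getD c []
      = d.getD c [] ++ (l.filter (fun x => k x == c)).map v := by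
  induction l generalizing d with
  | nil => simp
  | cons hd tl ih =>
    simp only [List.foldl_cons, List.filter_cons]
    rw [ih, PySem.Dict.getD_modify]
    by_cases h : k hd = c
    · subst h
      simp
    · rw [if_neg (fun hh => h hh.symm)]
      simp [h]

theorem pv_ofNat_beq (a b : Nat) : (Int.ofNat a == Int.ofNat b) = decide (a = b) := by
  by_cases h : a = b <;> simp [h]

theorem endpoint_exists_py_alt_eq_any (method path : String)
    (openapi : List (String × List (String × List (String × String)))) :
    endpoint_exists_py_alt method path openapi =
      (((PySem.Dict.mk openapi).get? "paths").getD []).any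
        (fun p => pvPathsMatchA path p.1 && (PySem.Dict.mk p.2).contains (PySem.Str.lower method)) := by
  unfold endpoint_exists_py_alt
  simp only []
  rw [pv_getD_foldl_modify_key
    (l := ((PySem.Dict.mk openapi).get? "paths").getD [])
    (k := fun p => Int.ofNat (pvNormSegsB p.1).length)
    (v := fun p => (pvNormSegsB p.1, p.2))
    (d := PySem.Dict.empty)
    (c := Int.ofNat (pvNormSegsB path).length)]
  rw [PySem.Dict.getD_empty, List.nil_append, List.any_map, List.any_filter]
  apply List.any_congr rfl
  intro p
  simp only [Function.comp]
  rw [pvPathsMatchA_eq]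
  rw [pv_ofNat_beq]
  generalize decide ((pvNormSegsB p.1).length = (pvNormSegsB path).length) = b1
  generalize (PySem.Dict.mk p.2).contains (PySem.Str.lower method) = b2
  generalize pvSegsMatchB (pvNormSegsB path) (pvNormSegsB p.1) = b3
  cases b1 <;> cases b2 <;> cases b3 <;> rfl

-- ===== VERDICT (by name: the statement is the Claim_ definition above) =====
theorem endpoint_exists_py_spec : Claim_equal_endpoint_exists_py := by
  intro method path openapi _
  unfold Spec_endpoint_exists_py
  rw [endpoint_exists_py_eq_any, endpoint_exists_py_alt_eq_any]
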